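-- pv_equiv track=rewrite | github.com/AleVlaKon/algorytm | 4/4.2.14.py | return_digits_of_n
-- ===== SOURCE A (Python) =====
-- def return_digits_of_n(n):
--     digits = []
--     while n > 0:
--         last_digit = n % 10
--         if last_digit != 0:
--             digits.append(last_digit)
--         n //= 10
--     return digits
-- ===== SOURCE B (Python) =====
-- def return_digits_of_n(n):
--     if n <= 0:
--         return []
--     return [int(c) for c in reversed(str(n)) if c != '0']
-- ===== Notes on version B (the rewrite author's own statement) =====
-- stated objective: idiomatic
-- what changed: Replaces the arithmetic mod/floordiv accumulation loop with a string-based comprehension over reversed(str(n)) that keeps non-'0' characters and converts them back with int.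
import Mathlib
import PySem

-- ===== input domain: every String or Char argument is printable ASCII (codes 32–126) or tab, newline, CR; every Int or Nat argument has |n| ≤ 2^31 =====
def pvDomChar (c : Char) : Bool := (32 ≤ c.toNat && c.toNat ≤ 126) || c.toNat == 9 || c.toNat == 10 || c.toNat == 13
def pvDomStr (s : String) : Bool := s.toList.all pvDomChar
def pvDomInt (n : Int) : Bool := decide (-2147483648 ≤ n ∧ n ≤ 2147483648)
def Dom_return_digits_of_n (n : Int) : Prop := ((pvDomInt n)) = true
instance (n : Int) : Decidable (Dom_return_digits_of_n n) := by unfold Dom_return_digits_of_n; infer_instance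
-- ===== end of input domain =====

-- B replaces A's mod/floordiv accumulation loop with an idiomatic pass over reversed(str(n)).

-- ===== PORT A =====
-- while n > 0: take n % 10, append if nonzero, n //= 10
def pvLoopA (n : Int) (digits : List Int) : List Int :=
  if 0 < n then
    let last_digit := PySem.Int.mod n 10
    pvLoopA (PySem.Int.floordiv n 10)
      (if last_digit ≠ 0 then digits ++ [last_digit] else digits)
  else digits
termination_by n.toNat
decreasing_by
  simp only [PySem.Int.floordiv, Int.fdiv_eq_ediv]
  simp only [show ((0:Int) ≤ 10 ∨ (10:Int) ∣ n) = True from by simp, if_true]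
  omega

def return_digits_of_n (n : Int) : List Int := pvLoopA n []

-- ===== PORT B =====
-- `int(c)` on a single decimal-digit character is exactly c.toNat - 48, cast to Int.
def return_digits_of_n_alt (n : Int) : List Int :=
  if n ≤ 0 then []
  else ((PySem.Int.toStr n).toList.reverse.filter (fun c => c ≠ '0')).map
    (fun c => ((c.toNat : Int) - 48))

-- ===== PRECONDITION & SPEC =====
def Spec_return_digits_of_n (n : Int) (out : List Int) : Prop := out = return_digits_of_n_alt n
instance (n : Int) (out : List Int) : Decidable (Spec_return_digits_of_n n out) := by unfold Spec_return_digits_of_n; infer_instance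

-- ===== CLAIM (what is proved, stated in full; the proofs are below) =====
def Claim_equal_return_digits_of_n : Prop := ∀ (n : Int), Dom_return_digits_of_n n → Spec_return_digits_of_n n (return_digits_of_n n)

-- ===== LEMMAS AND PROOFS =====

-- the canonical value both sides reduce to
def pvCanon (m : Nat) : List Int :=
  ((Nat.digits 10 m).filter (fun d => d ≠ 0)).map Int.ofNat

lemma pvLoopA_eq (m : Nat) (acc : List Int) :
    pvLoopA (m : Int) acc = acc ++ pvCanon m := by
  induction m using Nat.strong_induction_on generalizing acc with
  | _ m ih =>
    rw [pvLoopA.eq_def]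
    by_cases hm : 0 < m
    · have hmod : PySem.Int.mod (m : Int) 10 = ((m % 10 : Nat) : Int) := by
        simp only [PySem.Int.mod, Int.fmod_eq_emod]
        rw [if_pos (Or.inl (by norm_num))]
        omega
      have hdiv : PySem.Int.floordiv (m : Int) 10 = ((m / 10 : Nat) : Int) := by
        simp only [PySem.Int.floordiv, Int.fdiv_eq_ediv]
        rw [if_pos (Or.inl (by norm_num))]
        omega
      have hpos : (0:Int) < (m : Int) := by exact_mod_cast hm
      rw [if_pos hpos, hmod, hdiv, ih (m / 10) (by omega)]
      have hdig : Nat.digits 10 m = m % 10 :: Nat.digits 10 (m / 10) :=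
        Nat.digits_def' (by norm_num) hm
      by_cases hz : m % 10 = 0
      · have hz' : ¬ ((m % 10 : Nat) : Int) ≠ 0 := by simp [hz]
        rw [if_neg hz']
        simp [pvCanon, hdig, hz]
      · have hz' : ((m % 10 : Nat) : Int) ≠ 0 := by exact_mod_cast hz
        rw [if_pos hz']
        simp [pvCanon, hdig, hz]
    · have : ¬ (0:Int) < (m : Int) := by exact_mod_cast hm
      rw [if_neg this]
      have : m = 0 := by omega
      simp [this, pvCanon]

lemma pvToDigitsCore_eq (fuel : Nat) : ∀ (m : Nat) (acc : List Char), m ≤ fuel → 0 < m →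
    Nat.toDigitsCore 10 (fuel + 1) m acc
      = ((Nat.digits 10 m).map Nat.digitChar).reverse ++ acc := by
  induction fuel with
  | zero => intro m acc hle hpos; omega
  | succ f ih =>
    intro m acc hle hpos
    have hdig : Nat.digits 10 m = m % 10 :: Nat.digits 10 (m / 10) :=
      Nat.digits_def' (by norm_num) hpos
    rw [Nat.toDigitsCore]
    by_cases hz : m / 10 = 0
    · simp only [hz]
      simp [hdig, hz]
    · simp only [if_neg hz]
      rw [ih (m / 10) _ (by omega) (by omega)]
      simp [hdig]

lemma pvDigitChar_toNat {d : Nat} (h : d < 10) : (Nat.digitChar d).toNat = d + 48 := by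
  interval_cases d <;> decide

lemma pvDigitChar_ne_zero {d : Nat} (h : d < 10) :
    (decide (Nat.digitChar d ≠ '0')) = (decide (d ≠ 0)) := by
  interval_cases d <;> decide

lemma pvMapFilterMap (L : List Nat) (hL : ∀ d ∈ L, d < 10) :
    ((L.map Nat.digitChar).filter (fun c => c ≠ '0')).map (fun c => ((c.toNat : Int) - 48))
      = (L.filter (fun d => d ≠ 0)).map Int.ofNat := by
  induction L with
  | nil => simp
  | cons d L ih =>
    have hd : d < 10 := hL d (by simp)
    have hrest := ih (fun x hx => hL x (by simp [hx]))
    have hhead : ((Nat.digitChar d).toNat : Int) - 48 = Int.ofNat d := by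
      rw [pvDigitChar_toNat hd, Int.ofNat_eq_natCast]; push_cast; ring
    simp only [List.map_cons, List.filter_cons, pvDigitChar_ne_zero hd]
    by_cases hz : d = 0
    · subst hz
      simpa using hrest
    · have h1 : (decide (d ≠ 0)) = true := by simp [hz]
      rw [h1]
      simp only [if_true, List.map_cons]
      rw [hrest, hhead]

lemma pvAltEq (n : Int) (hn : 0 < n) :
    return_digits_of_n_alt n = pvCanon n.toNat := by
  have hm : 0 < n.toNat := by omega
  have hneg : ¬ n < 0 := by omega
  unfold return_digits_of_n_alt
  rw [if_neg (by omega)]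
  have htl : (PySem.Int.toStr n).toList = Nat.toDigits 10 n.toNat := by
    rw [PySem.Int.toList_toStr]
    simp [PySem.Int.toChars, hneg]
  rw [htl, Nat.toDigits, pvToDigitsCore_eq n.toNat n.toNat [] (le_refl _) hm]
  rw [List.append_nil, List.reverse_reverse]
  exact pvMapFilterMap _ (fun d hd => Nat.digits_lt_base (by norm_num) hd)

-- ===== VERDICT (by name: the statement is the Claim_ definition above) =====
theorem return_digits_of_n_spec : Claim_equal_return_digits_of_n := by
  intro n _
  unfold Spec_return_digits_of_n return_digits_of_n
  by_cases hn : 0 < n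
  · rw [pvAltEq n hn]
    conv_lhs => rw [show n = (n.toNat : Int) from by omega]
    rw [pvLoopA_eq, List.nil_append]
  · rw [pvLoopA.eq_def, if_neg hn]
    unfold return_digits_of_n_alt
    rw [if_pos (by omega)]
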